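-- pv_equiv track=rewrite | github.com/JoaoPFranca/PensamentoComputacional-2023.1 | Lista 5/Questão 1.py | encriptar_palavra
-- ===== SOURCE A (Python) =====
-- def encriptar_palavra(palavra):
--     encriptado = "" #Indica que é uma função de String
--     for letra in palavra: #checa cada caracter
--         if letra >= 'a' and letra <= 'e':
--             encriptado += '1' #alimenta a variavel encriptado com o valor 1.
--         elif letra >= 'f' and letra <= 'j':
--             encriptado += '2'
--         elif letra >= 'k' and letra <= 'o':
--             encriptado += '3'
--         elif letra >= 'p' and letra <= 'z':
--             encriptado += '4'
--         else:
--             encriptado += '5'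
--     return encriptado
-- ===== SOURCE B (Python) =====
-- def encriptar_palavra(palavra):
--     # Divide and conquer: split the string in half, encrypt each half
--     # recursively, concatenate; a single character is encoded by integer
--     # arithmetic on its code point (no comparison ladder, no table).
--     n = len(palavra)
--     if n == 0:
--         return ""
--     if n == 1:
--         k = ord(palavra) - ord('a')
--         return str(min(k // 5, 3) + 1) if 0 <= k < 26 else '5'
--     m = n // 2
--     return encriptar_palavra(palavra[:m]) + encriptar_palavra(palavra[m:])
-- ===== Notes on version B (the rewrite author's own statement) =====
-- stated objective: alternative
-- what changed: Replaces the left-to-right loop with a cascading comparison ladder and repeated concatenation by a divide-and-conquer recursion that splits the string in half and encodes a single character by closed-form arithmetic on its code point, with the same default digit for non-lowercase characters.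
import Mathlib
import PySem

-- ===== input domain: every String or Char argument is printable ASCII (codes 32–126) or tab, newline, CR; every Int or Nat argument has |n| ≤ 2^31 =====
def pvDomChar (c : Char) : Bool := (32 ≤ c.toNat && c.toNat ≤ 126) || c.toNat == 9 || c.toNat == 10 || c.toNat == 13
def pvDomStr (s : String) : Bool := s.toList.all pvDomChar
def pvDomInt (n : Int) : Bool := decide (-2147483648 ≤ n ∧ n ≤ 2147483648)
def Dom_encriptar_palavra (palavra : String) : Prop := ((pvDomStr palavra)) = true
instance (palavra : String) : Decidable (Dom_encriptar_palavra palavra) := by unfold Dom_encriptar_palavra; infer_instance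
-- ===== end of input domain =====

-- B replaces A's left-to-right comparison-ladder loop by a divide-and-conquer
-- recursion (split in half, encrypt halves, concatenate) whose base case encodes
-- one character by closed-form code-point arithmetic (alternative decomposition).

-- ===== PORT A =====
def encriptar_palavra (palavra : String) : String :=
  palavra.toList.foldl
    (fun encriptado letra =>
      if 'a' ≤ letra ∧ letra ≤ 'e' then encriptado ++ "1"
      else if 'f' ≤ letra ∧ letra ≤ 'j' then encriptado ++ "2"
      else if 'k' ≤ letra ∧ letra ≤ 'o' then encriptado ++ "3"
      else if 'p' ≤ letra ∧ letra ≤ 'z' then encriptado ++ "4"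
      else encriptado ++ "5")
    ""

-- ===== PORT B =====
-- Source B's recursion over the characters; palavra[:m] / palavra[m:] with
-- 0 ≤ m ≤ len(palavra) are exactly List.take m / List.drop m.
def pvAltGo (cs : List Char) : List Char :=
  match h : cs with
  | [] => []                                   -- n == 0: return ""
  | [c] =>                                     -- n == 1: arithmetic encoding
      let k : Int := (c.toNat : Int) - 97
      if 0 ≤ k ∧ k < 26 then (PySem.Int.toStr (min (PySem.Int.floordiv k 5) 3 + 1)).toList
      else ['5']
  | _ :: _ :: _ =>                             -- split in half and recurse
      let m := cs.length / 2                   -- m = n // 2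
      pvAltGo (cs.take m) ++ pvAltGo (cs.drop m)
termination_by cs.length
decreasing_by
  · subst h; simp; omega
  · subst h; simp; omega

def encriptar_palavra_alt (palavra : String) : String :=
  String.ofList (pvAltGo palavra.toList)

-- ===== PRECONDITION & SPEC =====
def Spec_encriptar_palavra (palavra : String) (out : String) : Prop := out = encriptar_palavra_alt palavra
instance (palavra : String) (out : String) : Decidable (Spec_encriptar_palavra palavra out) := by unfold Spec_encriptar_palavra; infer_instance

-- ===== CLAIM (what is proved, stated in full; the proofs are below) =====
def Claim_equal_encriptar_palavra : Prop := ∀ (palavra : String), Dom_encriptar_palavra palavra → Spec_encriptar_palavra palavra (encriptar_palavra palavra)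

-- ===== LEMMAS AND PROOFS =====

-- A's if-ladder with the accumulator factored out (proof-side helper).
def digitA (letra : Char) : String :=
  if 'a' ≤ letra ∧ letra ≤ 'e' then "1"
  else if 'f' ≤ letra ∧ letra ≤ 'j' then "2"
  else if 'k' ≤ letra ∧ letra ≤ 'o' then "3"
  else if 'p' ≤ letra ∧ letra ≤ 'z' then "4"
  else "5"

theorem charLe (a c : Char) : (a ≤ c) ↔ a.toNat ≤ c.toNat := by
  rw [Char.le_def, UInt32.le_iff_toNat_le]; rfl

-- B's base-case arithmetic computes exactly A's per-character classification.
theorem char_step (c : Char) :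
    (if 0 ≤ ((c.toNat : Int) - 97) ∧ ((c.toNat : Int) - 97) < 26
     then (PySem.Int.toStr (min (PySem.Int.floordiv ((c.toNat : Int) - 97) 5) 3 + 1)).toList
     else ['5']) = (digitA c).toList := by
  by_cases h : 97 ≤ c.toNat ∧ c.toNat ≤ 122
  · obtain ⟨h1, h2⟩ := h
    have hc := (Char.ofNat_toNat c).symm
    set n := c.toNat with hn
    interval_cases n <;> (rw [hc]; decide)
  · push Not at h
    have hout : ¬ (0 ≤ ((c.toNat : Int) - 97) ∧ ((c.toNat : Int) - 97) < 26) := by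
      intro ⟨u, v⟩; have := h (by omega); omega
    have hab : ∀ (x y : Char), x ≤ c → c ≤ y → 97 ≤ x.toNat → y.toNat ≤ 122 → False := by
      intro x y hx hy hx9 hy1
      rw [charLe] at hx hy
      have := h (by omega); omega
    have h5 : digitA c = "5" := by
      unfold digitA
      split_ifs with g1 g2 g3 g4
      · exact (hab 'a' 'e' g1.1 g1.2 (by decide) (by decide)).elim
      · exact (hab 'f' 'j' g2.1 g2.2 (by decide) (by decide)).elim
      · exact (hab 'k' 'o' g3.1 g3.2 (by decide) (by decide)).elim
      · exact (hab 'p' 'z' g4.1 g4.2 (by decide) (by decide)).elim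
      · rfl
    rw [if_neg hout, h5]; decide

theorem stepA_eq (encriptado : String) (letra : Char) :
    (if 'a' ≤ letra ∧ letra ≤ 'e' then encriptado ++ "1"
     else if 'f' ≤ letra ∧ letra ≤ 'j' then encriptado ++ "2"
     else if 'k' ≤ letra ∧ letra ≤ 'o' then encriptado ++ "3"
     else if 'p' ≤ letra ∧ letra ≤ 'z' then encriptado ++ "4"
     else encriptado ++ "5") = encriptado ++ digitA letra := by
  unfold digitA
  split_ifs <;> rfl

-- A's fold appends the per-character digits left to right.
theorem foldA_eq (cs : List Char) (acc : String) :
    cs.foldl (fun encriptado letra => encriptado ++ digitA letra) acc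
    = acc ++ String.ofList (cs.flatMap (fun c => (digitA c).toList)) := by
  induction cs generalizing acc with
  | nil => simp
  | cons c cs ih =>
      rw [List.foldl_cons, ih]
      apply String.toList_inj.mp
      simp [String.toList_ofList]

-- B's divide-and-conquer also produces the per-character digits left to right.
theorem altGo_eq (cs : List Char) :
    pvAltGo cs = cs.flatMap (fun c => (digitA c).toList) := by
  induction hn : cs.length using Nat.strong_induction_on generalizing cs with
  | _ n ih =>
    match h : cs with
    | [] => simp [pvAltGo]
    | [c] => rw [pvAltGo]; simpa using char_step c
    | c1 :: c2 :: rest =>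
      rw [pvAltGo]
      have hlen : (c1 :: c2 :: rest).length = n := hn
      set l := c1 :: c2 :: rest with hl
      have h2 : 2 ≤ l.length := by simp [hl]
      rw [ih (l.take (l.length / 2)).length (by simp; omega) _ rfl,
          ih (l.drop (l.length / 2)).length (by simp; omega) _ rfl,
          ← List.flatMap_append, List.take_append_drop]

-- ===== VERDICT (by name: the statement is the Claim_ definition above) =====
theorem encriptar_palavra_spec : Claim_equal_encriptar_palavra := by
  intro palavra _
  show encriptar_palavra palavra = encriptar_palavra_alt palavra
  unfold encriptar_palavra encriptar_palavra_alt
  have hfun : (fun (encriptado : String) (letra : Char) =>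
      if 'a' ≤ letra ∧ letra ≤ 'e' then encriptado ++ "1"
      else if 'f' ≤ letra ∧ letra ≤ 'j' then encriptado ++ "2"
      else if 'k' ≤ letra ∧ letra ≤ 'o' then encriptado ++ "3"
      else if 'p' ≤ letra ∧ letra ≤ 'z' then encriptado ++ "4"
      else encriptado ++ "5")
      = fun encriptado letra => encriptado ++ digitA letra :=
    funext fun e => funext fun l => stepA_eq e l
  rw [hfun, foldA_eq, altGo_eq]
  apply String.toList_inj.mp
  simp [String.toList_ofList]
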